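-- pv_equiv track=rewrite | github.com/Norma-Q/Pauli-Propagation---GPU-acceleration | test_qaoa/sample_qaoa_cudaq.py | _parse_counts_keys
-- ===== SOURCE A (Python) =====
-- from typing import Any, Dict, Optional
--
-- def _parse_counts_keys(counts: Dict[str, int], n_qubits: int, bit_order: str) -> Dict[int, int]:
--     out: Dict[int, int] = {}
--     for k, v in counts.items():
--         ks = str(k).strip()
--         if all(ch in ("0", "1") for ch in ks) and len(ks) == int(n_qubits):
--             code = 0
--             if str(bit_order) == "le":
--                 for i, ch in enumerate(ks):
--                     code |= (int(ch) & 1) << i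
--             else:
--                 for i, ch in enumerate(ks):
--                     code |= (int(ch) & 1) << (int(n_qubits) - 1 - i)
--         elif ks.isdigit():
--             code = int(ks)
--         else:
--             raise ValueError(f"invalid bitstring key: {k}")
--         out[int(code)] = int(v)
--     return out
-- ===== SOURCE B (Python) =====
-- def _parse_counts_keys(counts, n_qubits, bit_order):
--     nq = int(n_qubits)
--     le = str(bit_order) == "le"
--     out = {}
--     for k, v in counts.items():
--         ks = str(k).strip()
--         if set(ks) <= {"0", "1"} and len(ks) == nq:
--             s = ks[::-1] if le else ks
--             code = int(s, 2) if s else 0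
--         elif ks.isdigit():
--             code = int(ks)
--         else:
--             raise ValueError(f"invalid bitstring key: {k}")
--         out[code] = int(v)
--     return out
-- ===== Notes on version B (the rewrite author's own statement) =====
-- stated objective: idiomatic
-- what changed: The manual enumerate/shift/OR bit-assembly loop is deleted entirely: the binary branch is a closed-form library parse int(ks[::-1],2) / int(ks,2) (with the empty string mapped to 0, since int('',2) raises), and the all-binary test becomes set(ks) <= {'0','1'}.
import Mathlib
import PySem

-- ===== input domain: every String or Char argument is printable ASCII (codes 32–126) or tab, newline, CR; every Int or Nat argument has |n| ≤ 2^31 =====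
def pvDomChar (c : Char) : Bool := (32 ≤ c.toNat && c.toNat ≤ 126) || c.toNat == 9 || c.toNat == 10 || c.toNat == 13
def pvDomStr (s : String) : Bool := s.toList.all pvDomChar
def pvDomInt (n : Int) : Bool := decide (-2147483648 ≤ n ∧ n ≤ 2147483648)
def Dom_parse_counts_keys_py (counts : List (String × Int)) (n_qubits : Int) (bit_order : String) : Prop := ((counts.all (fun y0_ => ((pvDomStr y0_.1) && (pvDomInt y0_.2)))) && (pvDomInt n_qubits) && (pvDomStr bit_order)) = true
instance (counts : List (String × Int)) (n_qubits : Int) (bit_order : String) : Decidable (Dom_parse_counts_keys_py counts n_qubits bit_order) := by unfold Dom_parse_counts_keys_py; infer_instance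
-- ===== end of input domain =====

-- B deletes A's manual enumerate/shift/OR bit-assembly loop: the binary branch becomes the
-- closed-form library parse int(ks[::-1],2) / int(ks,2) (empty string mapped to 0), and the
-- all-binary test becomes set(ks) <= {'0','1'} (idiomatic; not faster).

-- ===== PORT A =====
-- int(ch) — in A this is only reached on ch ∈ {'0','1'}, where ofStr? is always `some`
def pvIntOfCh (ch : Char) : Int := (PySem.Int.ofStr? (String.singleton ch)).getD 0

-- code |= (int(ch) & 1) << i  over enumerate(ks)  (little-endian); enumerate indices start at 0, so .toNat is exact
def pvACodeLe (cs : List Char) : Int :=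
  (PySem.List.enumerate cs 0).foldl
    (fun code p => PySem.Int.bor code ((PySem.Int.band (pvIntOfCh p.2) 1) <<< p.1.toNat)) 0

-- code |= (int(ch) & 1) << (n_qubits - 1 - i): in this branch n_qubits = len ks and i < len ks,
-- so the Python shift amount is ≥ 0 and .toNat is exact
def pvACodeBe (n_qubits : Int) (cs : List Char) : Int :=
  (PySem.List.enumerate cs 0).foldl
    (fun code p => PySem.Int.bor code ((PySem.Int.band (pvIntOfCh p.2) 1) <<< (n_qubits - 1 - p.1).toNat)) 0

-- the loop body: ks = str(k).strip(); the binary test, the isdigit fallback, out[int(code)] = int(v)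
def pvAStep (n_qubits : Int) (bit_order : String) (out : PySem.Dict Int Int) (kv : String × Int) : PySem.Dict Int Int :=
  let ks := PySem.Str.strip kv.1
  if ks.toList.all (fun ch => ch == '0' || ch == '1') && (PySem.Str.len ks == n_qubits) then
    let code := if bit_order == "le" then pvACodeLe ks.toList else pvACodeBe n_qubits ks.toList
    out.insert code kv.2
  else if PySem.Str.strIsdigit ks then
    out.insert ((PySem.Int.ofStr? ks).getD 0) kv.2
  else out  -- Python raises ValueError here: such inputs are excluded by Pre_

def parse_counts_keys_py (counts : List (String × Int)) (n_qubits : Int) (bit_order : String) : List (Int × Int) :=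
  (counts.foldl (pvAStep n_qubits bit_order) PySem.Dict.empty).items

-- ===== PORT B =====
def pvBit (c : Char) : Nat := if c == '1' then 1 else 0

-- int(s, 2): exact on the strings that reach it in B — nonempty, every char '0' or '1'
-- (no sign, no whitespace, no underscore, no 0b prefix); ported as Mathlib's base-2 Nat.ofDigits
-- over the little-endian digit list
def pvInt2 (s : String) : Int := ((Nat.ofDigits 2 (s.toList.reverse.map pvBit) : Nat) : Int)

-- ks[::-1]
def pvRev (s : String) : String := (PySem.Str.slice? s none none (-1)).getD ""

-- loop body of B: set(ks) <= {"0","1"} and len test, then the closed-form parse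
def pvBStep (nq : Int) (le : Bool) (out : PySem.Dict Int Int) (kv : String × Int) : PySem.Dict Int Int :=
  let ks := PySem.Str.strip kv.1
  if PySem.Set.issubset (PySem.Set.ofList ks.toList) ['0', '1'] && (PySem.Str.len ks == nq) then
    let s := if le then pvRev ks else ks
    out.insert (if s == "" then 0 else pvInt2 s) kv.2
  else if PySem.Str.strIsdigit ks then
    out.insert ((PySem.Int.ofStr? ks).getD 0) kv.2
  else out  -- Python raises ValueError here: such inputs are excluded by Pre_

def parse_counts_keys_py_alt (counts : List (String × Int)) (n_qubits : Int) (bit_order : String) : List (Int × Int) :=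
  (counts.foldl (pvBStep n_qubits (bit_order == "le")) PySem.Dict.empty).items

-- ===== PRECONDITION & SPEC =====
-- Pre_ excludes exactly the inputs on which A raises ValueError: some key whose stripped form is
-- neither an all-0/1 string of length n_qubits nor a nonempty digit string.
def Pre_parse_counts_keys_py (counts : List (String × Int)) (n_qubits : Int) (bit_order : String) : Prop :=
  (counts.all (fun kv =>
    (((PySem.Str.strip kv.1).toList.all (fun ch => ch == '0' || ch == '1'))
        && (PySem.Str.len (PySem.Str.strip kv.1) == n_qubits))
    || PySem.Str.strIsdigit (PySem.Str.strip kv.1))) = true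

instance (counts : List (String × Int)) (n_qubits : Int) (bit_order : String) : Decidable (Pre_parse_counts_keys_py counts n_qubits bit_order) := by unfold Pre_parse_counts_keys_py; infer_instance

def pvWitness_parse_counts_keys_py : (List (String × Int)) × Int × String :=
  ([("01", 2), (" 7 ", 1), ("10", 3)], 2, "le")

def Spec_parse_counts_keys_py (counts : List (String × Int)) (n_qubits : Int) (bit_order : String) (out : List (Int × Int)) : Prop := out = parse_counts_keys_py_alt counts n_qubits bit_order
instance (counts : List (String × Int)) (n_qubits : Int) (bit_order : String) (out : List (Int × Int)) : Decidable (Spec_parse_counts_keys_py counts n_qubits bit_order out) := by unfold Spec_parse_counts_keys_py; infer_instance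

-- ===== CLAIM (what is proved, stated in full; the proofs are below) =====
def Claim_equal_parse_counts_keys_py : Prop := ∀ (counts : List (String × Int)) (n_qubits : Int) (bit_order : String), Dom_parse_counts_keys_py counts n_qubits bit_order → Pre_parse_counts_keys_py counts n_qubits bit_order → Spec_parse_counts_keys_py counts n_qubits bit_order (parse_counts_keys_py counts n_qubits bit_order)

-- ===== LEMMAS AND PROOFS =====

-- disjoint OR is addition, low accumulator: a < 2^i → a ||| (b·2^i) = a + b·2^i  (b a bit)
theorem pv_lor_low (i : Nat) : ∀ a b : Nat, a < 2 ^ i → b ≤ 1 → a ||| (b <<< i) = a + b * 2 ^ i := by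
  induction i with
  | zero =>
    intro a b ha hb
    interval_cases a
    interval_cases b <;> simp [Nat.shiftLeft_eq]
  | succ i ih =>
    intro a b ha hb
    have hdecomp := Nat.bit_decide_mod_two_eq_one_shiftRight_one a
    have hb2 : b <<< (i + 1) = Nat.bit false (b <<< i) := by
      simp [Nat.shiftLeft_eq, Nat.bit_val, pow_succ]; try ring
    have hhalf : a >>> 1 < 2 ^ i := by
      have h2 : (2:Nat) ^ (i+1) = 2 ^ i * 2 := pow_succ 2 i
      simp only [Nat.shiftRight_one]
      omega
    calc a ||| (b <<< (i+1))
        = Nat.bit (decide (a % 2 = 1)) (a >>> 1) ||| Nat.bit false (b <<< i) := by rw [hdecomp, hb2]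
      _ = Nat.bit (decide (a % 2 = 1) || false) ((a >>> 1) ||| (b <<< i)) := Nat.lor_bit _ _ _ _
      _ = Nat.bit (decide (a % 2 = 1)) ((a >>> 1) + b * 2 ^ i) := by rw [ih _ b hhalf hb, Bool.or_false]
      _ = a + b * 2 ^ (i+1) := by
          rw [Nat.bit_val]
          simp only [Nat.shiftRight_one]
          have hsplit := Nat.div_add_mod a 2
          have hgp : b * 2 ^ (i+1) = 2 * (b * 2 ^ i) := by rw [pow_succ]; ring
          rcases Nat.mod_two_eq_zero_or_one a with h | h <;> simp [h] <;> omega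

-- disjoint OR is addition, high accumulator: (m·2^(p+1)) ||| (b·2^p) = m·2^(p+1) + b·2^p  (b a bit)
theorem pv_lor_high (p : Nat) : ∀ m b : Nat, b ≤ 1 → (m * 2 ^ (p + 1)) ||| (b <<< p) = m * 2 ^ (p + 1) + b * 2 ^ p := by
  induction p with
  | zero =>
    intro m b hb
    have h1 : m * 2 ^ (0 + 1) = Nat.bit false m := by simp [Nat.bit_val]; try ring
    interval_cases b
    · simp
    · have h2 : (1 : Nat) <<< 0 = Nat.bit true 0 := by decide
      rw [h1, h2, Nat.lor_bit]
      simp [Nat.bit_val]; try ring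
  | succ p ih =>
    intro m b hb
    have h1 : m * 2 ^ (p + 1 + 1) = Nat.bit false (m * 2 ^ (p + 1)) := by simp [Nat.bit_val, pow_succ]; try ring
    have h2 : b <<< (p + 1) = Nat.bit false (b <<< p) := by
      simp [Nat.shiftLeft_eq, Nat.bit_val, pow_succ]; try ring
    rw [h1, h2, Nat.lor_bit, ih m b hb]
    simp [Nat.bit_val, pow_succ]; try ring

theorem pvBit_le_one (c : Char) : pvBit c ≤ 1 := by unfold pvBit; split <;> omega

-- A's per-char contribution equals the bit, on binary chars
theorem pv_band_intOfCh (c : Char) (hc : c = '0' ∨ c = '1') :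
    PySem.Int.band (pvIntOfCh c) 1 = (pvBit c : Int) := by
  rcases hc with h | h <;> subst h <;> decide

-- the little-endian reference value
def pvValLe (cs : List Char) : Nat := cs.foldr (fun c acc => 2 * acc + pvBit c) 0

-- A's little-endian loop computes the little-endian value
theorem pvACodeLe_inv (cs : List Char) : ∀ (i a : Nat),
    (∀ c ∈ cs, c = '0' ∨ c = '1') → a < 2 ^ i →
    (PySem.List.enumerate cs (i : Int)).foldl
      (fun code p => PySem.Int.bor code ((PySem.Int.band (pvIntOfCh p.2) 1) <<< p.1.toNat)) (a : Int)
      = ((a + pvValLe cs * 2 ^ i : Nat) : Int) := by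
  induction cs with
  | nil => intro i a _ _; simp [PySem.List.enumerate_nil, pvValLe]
  | cons c cs ih =>
    intro i a hbin ha
    rw [PySem.List.enumerate_cons, List.foldl_cons]
    have hstep : PySem.Int.bor (a : Int) ((PySem.Int.band (pvIntOfCh ((i : Int), c).2) 1) <<< (((i : Int), c).1.toNat : Int))
        = ((a + pvBit c * 2 ^ i : Nat) : Int) := by
      simp only [Int.toNat_natCast]
      rw [pv_band_intOfCh c (hbin c (List.mem_cons_self))]
      rw [Int.shiftLeft_natCast, PySem.Int.bor_natCast, pv_lor_low i a (pvBit c) ha (pvBit_le_one c)]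
    have hlt : a + pvBit c * 2 ^ i < 2 ^ (i + 1) := by
      have hb := pvBit_le_one c
      have hm : pvBit c * 2 ^ i ≤ 1 * 2 ^ i := Nat.mul_le_mul_right _ hb
      have h2 : (2:Nat) ^ (i+1) = 2 ^ i * 2 := pow_succ 2 i
      omega
    rw [hstep]
    have hih := ih (i + 1) (a + pvBit c * 2 ^ i) (fun x hx => hbin x (List.mem_cons_of_mem _ hx)) hlt
    push_cast at hih ⊢
    rw [hih]
    simp only [pvValLe, List.foldr_cons]
    push_cast
    ring

-- A's big-endian loop is a Horner fold
theorem pvACodeBe_inv (cs : List Char) : ∀ (i h n : Nat),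
    (∀ c ∈ cs, c = '0' ∨ c = '1') → i + cs.length = n →
    (PySem.List.enumerate cs (i : Int)).foldl
      (fun code p => PySem.Int.bor code ((PySem.Int.band (pvIntOfCh p.2) 1) <<< ((n : Int) - 1 - p.1).toNat)) ((h * 2 ^ (n - i) : Nat) : Int)
      = ((cs.foldl (fun acc c => 2 * acc + pvBit c) h : Nat) : Int) := by
  induction cs with
  | nil =>
    intro i h n _ hn
    simp only [List.length_nil, Nat.add_zero] at hn
    subst hn
    simp [PySem.List.enumerate_nil]
  | cons c cs ih =>
    intro i h n hbin hn
    rw [PySem.List.enumerate_cons, List.foldl_cons]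
    have hin : i < n := by simp at hn; omega
    have hstep : PySem.Int.bor ((h * 2 ^ (n - i) : Nat) : Int)
        ((PySem.Int.band (pvIntOfCh ((i : Int), c).2) 1) <<< (((n : Int) - 1 - ((i : Int), c).1).toNat))
        = (((2 * h + pvBit c) * 2 ^ (n - (i + 1)) : Nat) : Int) := by
      have hp : ((n : Int) - 1 - (i : Int)).toNat = n - 1 - i := by omega
      simp only [hp]
      rw [pv_band_intOfCh c (hbin c (List.mem_cons_self))]
      rw [Int.shiftLeft_eq]
      have hcast : ((pvBit c : Int)) * 2 ^ (n - 1 - i) = ((pvBit c * 2 ^ (n - 1 - i) : Nat) : Int) := by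
        push_cast; ring
      rw [hcast, PySem.Int.bor_natCast]
      have hni : n - i = (n - 1 - i) + 1 := by omega
      rw [hni, ← Nat.shiftLeft_eq (pvBit c) (n - 1 - i), pv_lor_high (n - 1 - i) h (pvBit c) (pvBit_le_one c)]
      have he : n - (i + 1) = n - 1 - i := by omega
      rw [he]
      push_cast
      ring
    rw [hstep]
    have hih := ih (i + 1) (2 * h + pvBit c) n (fun x hx => hbin x (List.mem_cons_of_mem _ hx)) (by simp at hn ⊢; omega)
    rw [List.foldl_cons]
    push_cast at hih ⊢
    rw [hih]

-- the little-endian value is base-2 ofDigits of the bit list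
theorem pvValLe_eq_ofDigits (cs : List Char) : pvValLe cs = Nat.ofDigits 2 (cs.map pvBit) := by
  induction cs with
  | nil => rfl
  | cons c cs ih =>
    simp only [pvValLe, List.foldr_cons, List.map_cons, Nat.ofDigits_cons] at *
    omega

-- the Horner fold is base-2 ofDigits of the reversed bit list
theorem pv_horner_eq_ofDigits (cs : List Char) : ∀ h : Nat,
    cs.foldl (fun acc c => 2 * acc + pvBit c) h
      = Nat.ofDigits 2 ((cs.map pvBit).reverse) + h * 2 ^ cs.length := by
  induction cs with
  | nil => intro h; simp
  | cons c cs ih =>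
    intro h
    rw [List.foldl_cons, ih (2 * h + pvBit c)]
    simp only [List.map_cons, List.reverse_cons, Nat.ofDigits_append, List.length_reverse,
      List.length_map, List.length_cons, Nat.ofDigits_cons, Nat.ofDigits_nil]
    ring

-- the two all-binary tests agree
theorem pv_subset_iff (ks : String) :
    PySem.Set.issubset (PySem.Set.ofList ks.toList) ['0', '1']
      = ks.toList.all (fun ch => ch == '0' || ch == '1') := by
  by_cases h : ∀ c ∈ ks.toList, c = '0' ∨ c = '1'
  · have h1 : PySem.Set.issubset (PySem.Set.ofList ks.toList) ['0', '1'] = true := by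
      rw [PySem.Set.issubset_iff]
      intro x hx
      rcases h x ((PySem.Set.mem_ofList _ _).mp hx) with hc | hc <;> simp [hc]
    have h2 : ks.toList.all (fun ch => ch == '0' || ch == '1') = true := by
      simp only [List.all_eq_true, Bool.or_eq_true, beq_iff_eq]
      exact h
    rw [h1, h2]
  · have h1 : ¬ PySem.Set.issubset (PySem.Set.ofList ks.toList) ['0', '1'] = true := by
      rw [PySem.Set.issubset_iff]
      intro hc
      apply h
      intro c hcm
      have := hc c ((PySem.Set.mem_ofList _ _).mpr hcm)
      simpa using this
    have h2 : ¬ ks.toList.all (fun ch => ch == '0' || ch == '1') = true := by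
      simp only [List.all_eq_true, Bool.or_eq_true, beq_iff_eq]
      exact h
    rw [Bool.not_eq_true] at h1 h2
    rw [h1, h2]

-- B's little-endian branch value: if-guarded int(reversed, 2) is the little-endian value
theorem pvB_le_val (cs : List Char) :
    (if (String.ofList cs.reverse == "") = true then (0 : Int) else pvInt2 (String.ofList cs.reverse))
      = ((pvValLe cs : Nat) : Int) := by
  cases cs with
  | nil => rfl
  | cons c rest =>
    have hne : (String.ofList (c :: rest).reverse == "") = false := by
      apply beq_eq_false_iff_ne.mpr
      intro hcon
      have := congrArg String.toList hcon
      simp at this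
    rw [hne]
    simp only [Bool.false_eq_true, if_false, pvInt2, String.toList_ofList,
      List.reverse_reverse, pvValLe_eq_ofDigits]

-- B's big-endian branch value: if-guarded int(ks, 2) is the Horner fold
theorem pvB_be_val (ks : String) :
    (if (ks == "") = true then (0 : Int) else pvInt2 ks)
      = ((ks.toList.foldl (fun acc c => 2 * acc + pvBit c) 0 : Nat) : Int) := by
  by_cases h : ks = ""
  · subst h; rfl
  · have hne : (ks == "") = false := beq_eq_false_iff_ne.mpr h
    rw [hne]
    simp only [Bool.false_eq_true, if_false, pvInt2]
    rw [pv_horner_eq_ofDigits ks.toList 0]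
    simp [List.map_reverse]

-- per-key equality of the two step functions (on a ValueError key both ports skip identically,
-- so no hypothesis is needed at the port level; Pre_ still excludes those keys for the Python claim)
theorem pv_step_eq (n_qubits : Int) (bit_order : String) (kv : String × Int)
    (out : PySem.Dict Int Int) :
    pvAStep n_qubits bit_order out kv
    = pvBStep n_qubits (bit_order == "le") out kv := by
  unfold pvAStep pvBStep
  simp only []
  generalize PySem.Str.strip kv.1 = ks
  rw [pv_subset_iff]
  by_cases hbin : (ks.toList.all (fun ch => ch == '0' || ch == '1') && (PySem.Str.len ks == n_qubits)) = true
  · rw [if_pos hbin, if_pos hbin]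
    congr 1
    have hall : ∀ c ∈ ks.toList, c = '0' ∨ c = '1' := by
      have := (Bool.and_eq_true _ _).mp hbin |>.1
      simp only [List.all_eq_true, beq_iff_eq, Bool.or_eq_true] at this
      exact this
    have hlen : n_qubits = (ks.toList.length : Int) := by
      have h1 : PySem.Str.len ks = n_qubits := eq_of_beq ((Bool.and_eq_true _ _).mp hbin |>.2)
      rw [← h1]
      simp [PySem.Str.len]
    by_cases hbo : (bit_order == "le") = true
    · simp only [hbo, if_true]
      unfold pvACodeLe pvRev
      rw [PySem.Str.slice?_none_none_neg_one, Option.getD_some]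
      have hA := pvACodeLe_inv ks.toList 0 0 hall (by simp)
      simp only [Nat.cast_zero] at hA
      rw [hA, pvB_le_val]
      push_cast
      ring
    · have hbo' : (bit_order == "le") = false := by simpa using hbo
      simp only [hbo', Bool.false_eq_true, if_false]
      unfold pvACodeBe
      rw [hlen]
      have hA := pvACodeBe_inv ks.toList 0 0 ks.toList.length hall (by simp)
      simp only [Nat.zero_mul, Nat.sub_zero, Nat.cast_zero] at hA
      rw [hA, pvB_be_val]
  · rw [if_neg hbin, if_neg hbin]

theorem pv_fold_eq (counts : List (String × Int)) (n_qubits : Int) (bit_order : String) :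
    ∀ d : PySem.Dict Int Int,
    counts.foldl (pvAStep n_qubits bit_order) d
    = counts.foldl (pvBStep n_qubits (bit_order == "le")) d := by
  induction counts with
  | nil => intro d; simp only [List.foldl_nil]
  | cons kv rest ih =>
    intro d
    simp only [List.foldl_cons]
    rw [pv_step_eq n_qubits bit_order kv d]
    exact ih _

-- ===== VERDICT (by name: the statement is the Claim_ definition above) =====
theorem parse_counts_keys_py_spec : Claim_equal_parse_counts_keys_py := by
  intro counts n_qubits bit_order _ _
  unfold Spec_parse_counts_keys_py parse_counts_keys_py parse_counts_keys_py_alt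
  rw [pv_fold_eq counts n_qubits bit_order]
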